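-- pv_equiv track=rewrite | github.com/Rian-stack/C277_CSULB | lab3_Hangman/main.py | get_letters_remaining
-- ===== SOURCE A (Python) =====
-- def get_letters_remaining(incorrect, correct):
--   remaining_letters = [
--       'A', 'B', 'C', 'D', 'E', 'F', 'G', 'H', 'I', 'J', 'K', 'L', 'M', 'N',
--       'O', 'P', 'Q', 'R', 'S', 'T', 'U', 'V', 'W', 'X', 'Y', 'Z'
--   ]
--
--   guessed = incorrect + correct
--
--   #removes letters from remaining_letters list
--   for letter in guessed:
--     if letter in remaining_letters:
--       remaining_letters.remove(letter)
--
--   return remaining_letters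
-- ===== SOURCE B (Python) =====
-- def get_letters_remaining(incorrect, correct):
--   guessed = set(incorrect + correct)
--   return [c for c in 'ABCDEFGHIJKLMNOPQRSTUVWXYZ' if c not in guessed]
-- ===== Notes on version B (the rewrite author's own statement) =====
-- stated objective: idiomatic
-- what changed: Instead of mutating the alphabet list and calling list.remove for each guessed letter (a linear scan per guess), B builds a set of guessed letters once and filters the fixed alphabet in a single pass; no list is mutated and the loop runs over the alphabet, not over the guesses.
import Mathlib
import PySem

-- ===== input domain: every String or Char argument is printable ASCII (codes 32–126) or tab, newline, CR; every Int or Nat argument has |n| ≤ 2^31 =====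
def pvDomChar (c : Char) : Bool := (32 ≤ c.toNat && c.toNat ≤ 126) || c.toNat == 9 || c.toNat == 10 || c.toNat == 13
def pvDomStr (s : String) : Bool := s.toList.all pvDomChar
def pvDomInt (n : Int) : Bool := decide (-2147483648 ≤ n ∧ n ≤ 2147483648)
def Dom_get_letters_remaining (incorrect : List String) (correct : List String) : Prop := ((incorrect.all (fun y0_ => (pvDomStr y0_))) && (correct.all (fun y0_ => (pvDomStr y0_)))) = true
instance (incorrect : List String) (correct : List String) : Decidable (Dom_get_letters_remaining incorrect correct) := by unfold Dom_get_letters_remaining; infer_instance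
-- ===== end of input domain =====

-- B replaces A's mutate-and-remove loop over the guessed letters by a single filter
-- pass over the fixed alphabet against a set of guessed letters (objective: idiomatic).

def pvAlphabet : List String :=
  ["A", "B", "C", "D", "E", "F", "G", "H", "I", "J", "K", "L", "M", "N",
   "O", "P", "Q", "R", "S", "T", "U", "V", "W", "X", "Y", "Z"]

-- ===== PORT A =====
-- for letter in guessed: if letter in remaining: remaining.remove(letter)
def get_letters_remaining (incorrect : List String) (correct : List String) : List String :=
  (incorrect ++ correct).foldl
    (fun remaining letter =>
      if remaining.contains letter then
        (PySem.List.remove? remaining letter).getD remaining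
      else remaining)
    pvAlphabet

-- ===== PORT B =====
-- guessed = set(incorrect + correct); [c for c in alphabet if c not in guessed]
def get_letters_remaining_alt (incorrect : List String) (correct : List String) : List String :=
  let guessed : PySem.Set String := PySem.Set.ofList (incorrect ++ correct)
  pvAlphabet.filter (fun c => !(PySem.Set.contains guessed c))

-- ===== PRECONDITION & SPEC =====
def Spec_get_letters_remaining (incorrect : List String) (correct : List String) (out : List String) : Prop := out = get_letters_remaining_alt incorrect correct
instance (incorrect : List String) (correct : List String) (out : List String) : Decidable (Spec_get_letters_remaining incorrect correct out) := by unfold Spec_get_letters_remaining; infer_instance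

-- ===== CLAIM (what is proved, stated in full; the proofs are below) =====
def Claim_equal_get_letters_remaining : Prop := ∀ (incorrect : List String) (correct : List String), Dom_get_letters_remaining incorrect correct → Spec_get_letters_remaining incorrect correct (get_letters_remaining incorrect correct)

-- ===== LEMMAS AND PROOFS =====

-- one step of A's loop on a duplicate-free list is a filter
theorem pv_step_eq_filter (rem : List String) (g : String) (h : rem.Nodup) :
    (if rem.contains g then (PySem.List.remove? rem g).getD rem else rem)
      = rem.filter (fun c => c ≠ g) := by
  by_cases hg : g ∈ rem
  · rw [if_pos (by simpa using hg), PySem.List.remove?_eq_some_erase rem g hg,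
      Option.getD_some, List.Nodup.erase_eq_filter h]
    refine List.filter_congr (fun c _ => ?_)
    rw [Bool.eq_iff_iff]
    simp [bne_iff_ne]
  · rw [if_neg (by simpa using hg)]
    symm
    refine List.filter_eq_self.2 (fun c hc => ?_)
    simp only [decide_eq_true_eq]
    rintro rfl; exact hg hc
-- A's loop over gs on a duplicate-free list filters out all letters of gs
theorem pv_loop_eq_filter (gs : List String) : ∀ (rem : List String), rem.Nodup →
    gs.foldl (fun remaining letter =>
        if remaining.contains letter then
          (PySem.List.remove? remaining letter).getD remaining
        else remaining) rem
      = rem.filter (fun c => !(gs.contains c)) := by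
  induction gs with
  | nil => intro rem _; simp
  | cons g gs ih =>
    intro rem h
    rw [List.foldl_cons, pv_step_eq_filter rem g h, ih _ (h.filter _),
      List.filter_filter]
    refine List.filter_congr (fun c _ => ?_)
    simp [eq_comm, Bool.and_comm]

-- ===== VERDICT (by name: the statement is the Claim_ definition above) =====
theorem get_letters_remaining_spec : Claim_equal_get_letters_remaining := by
  intro incorrect correct _
  show get_letters_remaining incorrect correct = get_letters_remaining_alt incorrect correct
  rw [get_letters_remaining, get_letters_remaining_alt,
    pv_loop_eq_filter _ pvAlphabet (by decide)]
  refine List.filter_congr (fun c _ => ?_)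
  simp [PySem.Set.mem_ofList]
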